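-- pv_equiv track=rewrite | github.com/metonline/mgbric | fix_hands_sealed.py | calculate_fourth_hand
-- ===== SOURCE A (Python) =====
-- def calculate_fourth_hand(n_hand, e_hand, s_hand):
--     """
--     Calculate the 4th hand (W) from remaining 52 cards
--     """
--     # Map all 52 cards
--     suits = ['S', 'H', 'D', 'C']
--     ranks = ['A', 'K', 'Q', 'J', 'T', '9', '8', '7', '6', '5', '4', '3', '2']
--
--     all_cards = set()
--     for suit in suits:
--         for rank in ranks:
--             all_cards.add(rank + suit)
--
--     # Parse the 3 hands and remove their cards
--     for hand_pbn in [n_hand, e_hand, s_hand]: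
--         parts = hand_pbn.split('.')
--         for suit_idx, suit in enumerate(suits):
--             cards = parts[suit_idx] if suit_idx < len(parts) else ''
--             for card in cards:
--                 all_cards.discard(card + suit)
--
--     # Organize remaining cards by suit
--     remaining = {'S': '', 'H': '', 'D': '', 'C': ''}
--     for card in sorted(all_cards, key=lambda x: (ranks.index(x[0]))):
--         remaining[card[1]] += card[0]
--
--     # Return in PBN format (S.H.D.C)
--     return f"{remaining['S']}.{remaining['H']}.{remaining['D']}.{remaining['C']}"
-- ===== SOURCE B (Python) =====
-- def calculate_fourth_hand(n_hand, e_hand, s_hand):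
--     """
--     Calculate the 4th hand (W) from remaining 52 cards
--     """
--     ranks = "AKQJT98765432"
--     hands_parts = [h.split('.') for h in (n_hand, e_hand, s_hand)]
--     out = []
--     for i in range(4):
--         used = set()
--         for parts in hands_parts:
--             if i < len(parts):
--                 used.update(parts[i])
--         out.append(''.join(r for r in ranks if r not in used))
--     return '.'.join(out)
-- ===== Notes on version B (the rewrite author's own statement) =====
-- stated objective: simpler
-- what changed: B computes each suit directly — for each of the four dot-parts it collects the ranks used by the three hands and emits the canonical rank string minus those — dropping A's global 52-card set, its discard loop over all suits, and the final keyed sort and dict regrouping.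
import Mathlib
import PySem

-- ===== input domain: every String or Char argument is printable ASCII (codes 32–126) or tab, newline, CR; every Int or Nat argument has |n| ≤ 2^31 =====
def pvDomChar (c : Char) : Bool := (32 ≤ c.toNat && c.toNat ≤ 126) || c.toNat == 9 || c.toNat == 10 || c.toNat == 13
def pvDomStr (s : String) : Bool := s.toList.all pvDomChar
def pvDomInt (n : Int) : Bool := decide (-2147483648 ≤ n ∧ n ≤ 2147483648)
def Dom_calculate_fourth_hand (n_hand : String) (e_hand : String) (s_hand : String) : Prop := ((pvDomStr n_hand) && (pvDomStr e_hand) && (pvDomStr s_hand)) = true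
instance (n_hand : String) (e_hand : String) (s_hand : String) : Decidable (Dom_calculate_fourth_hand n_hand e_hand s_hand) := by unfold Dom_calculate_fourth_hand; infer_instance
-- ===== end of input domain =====

-- B rebuilds each suit directly (missing ranks of that suit's three parts, in canonical
-- rank order), instead of A's global 52-card set, discard loop and final keyed sort;
-- objective: simpler. Return values agree on all inputs (both functions are total).

-- ===== PORT A =====
-- A-side helpers: the suit and rank literals of A; a two-character card string
-- "rank + suit" is modelled throughout as its (rank, suit) pair of Chars — exact,
-- since every card string A builds or compares has exactly these two characters.
def pvSuitsA : List Char := ['S', 'H', 'D', 'C']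
def pvRanksA : List Char := ['A', 'K', 'Q', 'J', 'T', '9', '8', '7', '6', '5', '4', '3', '2']

-- all_cards = set(); for suit in suits: for rank in ranks: all_cards.add(rank + suit)
def pvAllCardsA : PySem.Set (Char × Char) :=
  pvSuitsA.foldl (fun acc suit =>
    pvRanksA.foldl (fun acc rank => PySem.Set.add acc (rank, suit)) acc) PySem.Set.empty

def calculate_fourth_hand (n_hand : String) (e_hand : String) (s_hand : String) : String :=
  -- for hand_pbn in [n_hand, e_hand, s_hand]: parts = hand_pbn.split('.'); …
  let all_cards : PySem.Set (Char × Char) :=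
    [n_hand, e_hand, s_hand].foldl (fun acc hand_pbn =>
      let parts := PySem.Chars.splitOn hand_pbn.toList ['.']
      (PySem.List.enumerate pvSuitsA).foldl (fun acc p =>
        -- cards = parts[suit_idx] if suit_idx < len(parts) else ''  (suit_idx = p.1 ≥ 0)
        let cards := (PySem.List.pyGet? parts p.1).getD []
        cards.foldl (fun acc card => PySem.Set.discard acc (card, p.2)) acc) acc) pvAllCardsA
  -- sorted(all_cards, key=lambda x: ranks.index(x[0])); on every element of all_cards
  -- the rank is in pvRanksA, so Python's ranks.index(x[0]) is index? …|>.getD 13 exactly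
  let sortedCards := PySem.List.sorted all_cards (fun x => (PySem.List.index? pvRanksA x.1).getD 13)
  let remaining : PySem.Dict Char (List Char) :=
    PySem.Dict.ofList [('S', []), ('H', []), ('D', []), ('C', [])]
  -- remaining[card[1]] += card[0]  (the key card[1] is always present here)
  let remaining := sortedCards.foldl
    (fun d card => PySem.Dict.modify d card.2 [] (fun v => v ++ [card.1])) remaining
  String.ofList (remaining.getD 'S' [] ++ ['.'] ++ remaining.getD 'H' [] ++ ['.'] ++
    remaining.getD 'D' [] ++ ['.'] ++ remaining.getD 'C' [])

-- ===== PORT B =====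
def pvRanksB : List Char := "AKQJT98765432".toList

def calculate_fourth_hand_alt (n_hand : String) (e_hand : String) (s_hand : String) : String :=
  let hands_parts := [n_hand, e_hand, s_hand].map (fun h => PySem.Chars.splitOn h.toList ['.'])
  let out := (PySem.List.pyRange 0 4 1).map (fun i =>
    let used : PySem.Set Char := hands_parts.foldl (fun u parts =>
      if i < (parts.length : Int) then PySem.Set.update u ((PySem.List.pyGet? parts i).getD []) else u)
      PySem.Set.empty
    pvRanksB.filter (fun r => !(PySem.Set.contains used r)))
  String.ofList ((List.intersperse ['.'] out).flatten)

-- ===== PRECONDITION & SPEC =====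
def Spec_calculate_fourth_hand (n_hand : String) (e_hand : String) (s_hand : String) (out : String) : Prop := out = calculate_fourth_hand_alt n_hand e_hand s_hand
instance (n_hand : String) (e_hand : String) (s_hand : String) (out : String) : Decidable (Spec_calculate_fourth_hand n_hand e_hand s_hand out) := by unfold Spec_calculate_fourth_hand; infer_instance

-- ===== CLAIM (what is proved, stated in full; the proofs are below) =====
def Claim_equal_calculate_fourth_hand : Prop := ∀ (n_hand : String) (e_hand : String) (s_hand : String), Dom_calculate_fourth_hand n_hand e_hand s_hand → Spec_calculate_fourth_hand n_hand e_hand s_hand (calculate_fourth_hand n_hand e_hand s_hand)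

-- ===== LEMMAS AND PROOFS =====

-- a fold of filters is one filter by the conjunction of the tests
theorem pv_foldl_filter {α β : Type} (cs : List β) (p : β → α → Bool) (l : List α) :
    cs.foldl (fun ac c => ac.filter (p c)) l = l.filter (fun x => cs.all (fun c => p c x)) := by
  induction cs generalizing l with
  | nil => simp
  | cons c cs ih =>
    simp only [List.foldl_cons, ih, List.filter_filter, List.all_cons]
    exact List.filter_congr (fun x _ => by simp [Bool.and_comm])

-- A's discard loop over one suit's characters, as a filter
theorem pv_discard_fold (cards : List Char) (su : Char) (acc : List (Char × Char)) :
    cards.foldl (fun acc card => PySem.Set.discard acc (card, su)) acc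
      = acc.filter (fun x => cards.all (fun c => !(x == (c, su)))) :=
  pv_foldl_filter cards (fun c x => !(x == (c, su))) acc

theorem pv_insertBy_cons {α : Type} (before : α → α → Bool) (x y : α) (ys : List α) :
    PySem.List.insertBy before x (y :: ys) =
      if before x y then x :: y :: ys else y :: PySem.List.insertBy before x ys := by
  simp [PySem.List.insertBy]

theorem pv_insertBy_nil {α : Type} (before : α → α → Bool) (x : α) :
    PySem.List.insertBy before x [] = [x] := by
  simp [PySem.List.insertBy]

theorem pv_insertBy_pairwise {α κ : Type} [LinearOrder κ] (key : α → κ) (x : α) (l : List α)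
    (h : l.Pairwise (fun a b => key a ≤ key b)) :
    (PySem.List.insertBy (fun a b => decide (key a < key b)) x l).Pairwise (fun a b => key a ≤ key b) := by
  induction l with
  | nil => simp [pv_insertBy_nil]
  | cons y ys ih =>
    rw [List.pairwise_cons] at h
    rw [pv_insertBy_cons]
    by_cases hb : key x < key y
    · simp only [hb, decide_true, if_true]
      refine List.pairwise_cons.2 ⟨?_, List.pairwise_cons.2 h⟩
      intro z hz
      rcases List.mem_cons.1 hz with hz | hz
      · subst hz; exact le_of_lt hb
      · exact le_of_lt (lt_of_lt_of_le hb (h.1 z hz))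
    · simp only [hb, decide_false, Bool.false_eq_true, if_false]
      refine List.pairwise_cons.2 ⟨?_, ih h.2⟩
      intro z hz
      rcases (PySem.List.mem_insertBy _ _ _ _).1 hz with hz | hz
      · subst hz; exact le_of_not_gt hb
      · exact h.1 z hz

-- filtering commutes with a stable insertion into an already sorted list
theorem pv_filter_insertBy {α κ : Type} [LinearOrder κ] (key : α → κ) (q : α → Bool) (x : α)
    (l : List α) (h : l.Pairwise (fun a b => key a ≤ key b)) :
    (PySem.List.insertBy (fun a b => decide (key a < key b)) x l).filter q =
      if q x then PySem.List.insertBy (fun a b => decide (key a < key b)) x (l.filter q)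
      else l.filter q := by
  induction l with
  | nil => by_cases hq : q x <;> simp [pv_insertBy_nil, hq]
  | cons y ys ih =>
    rw [List.pairwise_cons] at h
    rw [pv_insertBy_cons]
    by_cases hb : key x < key y
    · simp only [hb, decide_true, if_true]
      have hall : ∀ z ∈ (y :: ys).filter q, decide (key x < key z) = true := by
        intro z hz
        have hz' := List.mem_of_mem_filter hz
        rcases List.mem_cons.1 hz' with hz' | hz'
        · subst hz'; exact decide_eq_true hb
        · exact decide_eq_true (lt_of_lt_of_le hb (h.1 z hz'))
      by_cases hq : q x
      · simp only [hq, if_true]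
        rw [List.filter_cons_of_pos hq]
        cases hf : (y :: ys).filter q with
        | nil => simp [pv_insertBy_nil]
        | cons z zs =>
          rw [pv_insertBy_cons]
          have := hall z (hf ▸ List.mem_cons_self)
          simp [this]
      · simp [hq]
    · simp only [hb, decide_false, Bool.false_eq_true, if_false]
      by_cases hqy : q y
      · rw [List.filter_cons_of_pos hqy, List.filter_cons_of_pos hqy, pv_insertBy_cons]
        simp only [hb, decide_false, Bool.false_eq_true, if_false]
        rw [ih h.2]
        by_cases hq : q x <;> simp [hq]
      · rw [List.filter_cons_of_neg hqy, List.filter_cons_of_neg hqy, ih h.2]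

theorem pv_foldl_insertBy_filter {α κ : Type} [LinearOrder κ] (key : α → κ) (q : α → Bool)
    (l : List α) (acc : List α) (h : acc.Pairwise (fun a b => key a ≤ key b)) :
    (l.foldl (fun acc x => PySem.List.insertBy (fun a b => decide (key a < key b)) x acc) acc).filter q =
      (l.filter q).foldl (fun acc x => PySem.List.insertBy (fun a b => decide (key a < key b)) x acc)
        (acc.filter q) := by
  induction l generalizing acc with
  | nil => rfl
  | cons x xs ih =>
    rw [List.foldl_cons, ih _ (pv_insertBy_pairwise key x acc h),
        pv_filter_insertBy key q x acc h]
    by_cases hq : q x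
    · rw [List.filter_cons_of_pos hq, if_pos hq, List.foldl_cons]
    · rw [List.filter_cons_of_neg hq, if_neg hq]

-- a stable sort commutes with filtering
theorem pv_sorted_filter {α κ : Type} [LinearOrder κ] (key : α → κ) (q : α → Bool) (l : List α) :
    PySem.List.sorted (l.filter q) key = (PySem.List.sorted l key).filter q := by
  rw [PySem.List.sorted_eq_foldl_insertBy, PySem.List.sorted_eq_foldl_insertBy,
      pv_foldl_insertBy_filter key q l [] (by simp)]
  rfl

theorem pv_contains_add {α : Type} [BEq α] [LawfulBEq α] (s : PySem.Set α) (x y : α) :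
    (PySem.Set.add s x).contains y = (s.contains y || y == x) := by
  simp only [PySem.Set.add, PySem.Set.contains, List.contains_eq_mem]
  split_ifs with h <;> by_cases hxy : y = x <;> simp_all

theorem pv_contains_update {α : Type} [BEq α] [LawfulBEq α] (s : PySem.Set α) (l : List α) (y : α) :
    (PySem.Set.update s l).contains y = (s.contains y || l.contains y) := by
  induction l generalizing s with
  | nil => simp [PySem.Set.update]
  | cons x xs ih =>
    simp only [PySem.Set.update, List.foldl_cons] at *
    rw [ih, pv_contains_add, List.contains_cons]
    by_cases hxy : y = x <;> simp [hxy, Bool.or_assoc, Bool.or_comm, Bool.or_left_comm]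

-- B's guarded used-set accumulation, read back through `contains`
theorem pv_contains_foldl_update {α β : Type} [BEq α] [LawfulBEq α]
    (hs : List β) (c : β → Prop) [DecidablePred c] (g : β → List α) (u0 : PySem.Set α) (y : α) :
    (hs.foldl (fun u parts => if c parts then PySem.Set.update u (g parts) else u) u0).contains y
      = (u0.contains y || hs.any (fun parts => decide (c parts) && (g parts).contains y)) := by
  induction hs generalizing u0 with
  | nil => simp
  | cons h hs ih =>
    simp only [List.foldl_cons, List.any_cons]
    by_cases hc : c h
    · rw [if_pos hc, ih, pv_contains_update]
      simp [hc, Bool.or_assoc]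
    · rw [if_neg hc, ih]
      simp [hc]

-- A's dict-accumulation loop, read back per key
theorem pv_dict_fold_getD (M : List (Char × Char)) (d : PySem.Dict Char (List Char)) (s : Char) :
    (M.foldl (fun d card => PySem.Dict.modify d card.2 [] (fun v => v ++ [card.1])) d).getD s [] =
      d.getD s [] ++ (M.filter (fun c => c.2 == s)).map (·.1) := by
  induction M generalizing d with
  | nil => simp
  | cons c M ih =>
    rw [List.foldl_cons, ih]
    simp only [PySem.Dict.modify, PySem.Dict.getD_insert, List.filter_cons]
    by_cases hs : c.2 = s <;> simp [hs, Ne.symm]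

-- the deck, in the order A's sort produces it (rank-major, suits in insertion order)
def pvR52 : List (Char × Char) := [('A','S'), ('A','H'), ('A','D'), ('A','C'), ('K','S'), ('K','H'), ('K','D'), ('K','C'), ('Q','S'), ('Q','H'), ('Q','D'), ('Q','C'), ('J','S'), ('J','H'), ('J','D'), ('J','C'), ('T','S'), ('T','H'), ('T','D'), ('T','C'), ('9','S'), ('9','H'), ('9','D'), ('9','C'), ('8','S'), ('8','H'), ('8','D'), ('8','C'), ('7','S'), ('7','H'), ('7','D'), ('7','C'), ('6','S'), ('6','H'), ('6','D'), ('6','C'), ('5','S'), ('5','H'), ('5','D'), ('5','C'), ('4','S'), ('4','H'), ('4','D'), ('4','C'), ('3','S'), ('3','H'), ('3','D'), ('3','C'), ('2','S'), ('2','H'), ('2','D'), ('2','C')]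

set_option maxRecDepth 40000 in
theorem pv_sorted_all :
    PySem.List.sorted pvAllCardsA (fun x => (PySem.List.index? pvRanksA x.1).getD 13) = pvR52 := by
  decide

theorem pv_pair_beq (r s a t : Char) : ((r, s) == (a, t)) = (r == a && s == t) := rfl

theorem pv_all_ne_suit (cards : List Char) (r : Char) {s t : Char} (h : s ≠ t) :
    cards.all (fun c => !((r, s) == (c, t))) = true := by simp [pv_pair_beq, h]

theorem pv_all_same_suit (cards : List Char) (r s : Char) :
    cards.all (fun c => !((r, s) == (c, s))) = !(cards.contains r) := by
  induction cards with
  | nil => rfl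
  | cons a l ih =>
    rw [List.all_cons, ih, List.contains_cons, pv_pair_beq]
    simp [Bool.not_or]

theorem pv_pyGet?_none {α : Type} (parts : List α) (i : Int) (h0 : 0 ≤ i)
    (h : ¬ i < (parts.length : Int)) : PySem.List.pyGet? parts i = none := by
  simp [PySem.List.pyGet?, PySem.List.pyIdx?, h0, h]

theorem pv_guard_elim (parts : List (List Char)) (i : Int) (h0 : 0 ≤ i) (r : Char) :
    (decide (i < (parts.length : Int)) && ((PySem.List.pyGet? parts i).getD []).contains r)
      = ((PySem.List.pyGet? parts i).getD []).contains r := by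
  by_cases h : i < (parts.length : Int)
  · simp [h]
  · simp [h, pv_pyGet?_none parts i h0 h]


theorem pv_suit_extract (su : Char) (Q : Char × Char → Bool)
    (hsu : pvR52.filter (fun a => a.2 == su) = pvRanksA.map (fun r => (r, su))) :
    (pvR52.filter (fun a => a.2 == su && Q a)).map (fun x => x.1)
      = pvRanksA.filter (fun r => Q (r, su)) := by
  rw [← List.filter_filter, List.filter_comm, hsu, List.filter_map, List.map_map]
  simp [Function.comp_def]

theorem pv_all_pair (cards : List Char) (r s t : Char) :
    cards.all (fun c => !((r, s) == (c, t))) = if s = t then !(cards.contains r) else true := by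
  by_cases h : s = t
  · rw [if_pos h]; subst h; exact pv_all_same_suit cards r s
  · rw [if_neg h]; exact pv_all_ne_suit cards r h

theorem pv_used (i : Int) (h0 : 0 ≤ i) (hp : List (List (List Char))) (r : Char) :
    PySem.Set.contains
      (hp.foldl (fun u parts =>
        if i < (parts.length : Int) then PySem.Set.update u ((PySem.List.pyGet? parts i).getD []) else u)
        PySem.Set.empty) r
      = hp.any (fun parts => ((PySem.List.pyGet? parts i).getD []).contains r) := by
  rw [pv_contains_foldl_update]
  have h1 : PySem.Set.contains PySem.Set.empty r = false := rfl
  rw [h1, Bool.false_or]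
  exact PySem.List.any_congr_mem (fun parts _ => pv_guard_elim parts i h0 r)


theorem pv_if_ne {p : Prop} [Decidable p] (h : ¬ p) (a : Bool) : (if p then a else true) = true :=
  if_neg h

-- ===== VERDICT (by name: the statement is the Claim_ definition above) =====
theorem calculate_fourth_hand_spec : Claim_equal_calculate_fourth_hand := by
  intro n e s _
  unfold Spec_calculate_fourth_hand calculate_fourth_hand calculate_fourth_hand_alt
  have henum : PySem.List.enumerate pvSuitsA = [((0:Int),'S'), (1,'H'), (2,'D'), (3,'C')] := by decide
  have hrange : PySem.List.pyRange 0 4 1 = [(0:Int),1,2,3] := by decide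
  -- B side: expose the four used-sets and read them back as `any` over the three part lists
  simp only [hrange, List.map_cons, List.map_nil]
  simp only [pv_used 0 (by norm_num), pv_used 1 (by norm_num), pv_used 2 (by norm_num),
    pv_used 3 (by norm_num)]
  -- A side: discards as filters, sort of the filtered deck, dict accumulation per suit
  simp only [henum, List.foldl_cons, List.foldl_nil,
    pv_discard_fold, List.filter_filter, pv_sorted_filter, pv_sorted_all, pv_dict_fold_getD]
  simp only [pv_suit_extract (su := 'S') (hsu := by decide),
    pv_suit_extract (su := 'H') (hsu := by decide),
    pv_suit_extract (su := 'D') (hsu := by decide),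
    pv_suit_extract (su := 'C') (hsu := by decide), pv_all_pair]
  refine congrArg String.ofList ?_
  have hdS : (PySem.Dict.ofList [('S',([]:List Char)), ('H',[]), ('D',[]), ('C',[])]).getD 'S' [] = [] := rfl
  have hdH : (PySem.Dict.ofList [('S',([]:List Char)), ('H',[]), ('D',[]), ('C',[])]).getD 'H' [] = [] := rfl
  have hdD : (PySem.Dict.ofList [('S',([]:List Char)), ('H',[]), ('D',[]), ('C',[])]).getD 'D' [] = [] := rfl
  have hdC : (PySem.Dict.ofList [('S',([]:List Char)), ('H',[]), ('D',[]), ('C',[])]).getD 'C' [] = [] := rfl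
  simp only [hdS, hdH, hdD, hdC, List.nil_append]
  simp only [reduceIte, List.any_cons, List.any_nil,
    Bool.or_false, Bool.not_or, List.intersperse, List.flatten_cons, List.flatten_nil,
    List.append_assoc, List.append_nil]
  simp only [pv_if_ne (by decide : ¬('S':Char) = 'H'), pv_if_ne (by decide : ¬('S':Char) = 'D'), pv_if_ne (by decide : ¬('S':Char) = 'C'), pv_if_ne (by decide : ¬('H':Char) = 'S'), pv_if_ne (by decide : ¬('H':Char) = 'D'), pv_if_ne (by decide : ¬('H':Char) = 'C'), pv_if_ne (by decide : ¬('D':Char) = 'S'), pv_if_ne (by decide : ¬('D':Char) = 'H'), pv_if_ne (by decide : ¬('D':Char) = 'C'), pv_if_ne (by decide : ¬('C':Char) = 'S'), pv_if_ne (by decide : ¬('C':Char) = 'H'), pv_if_ne (by decide : ¬('C':Char) = 'D'), Bool.true_and, Bool.and_true]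
  rw [show pvRanksA = pvRanksB from by decide]
  simp only [Bool.and_comm, Bool.and_assoc]
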